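-- pv_equiv track=rewrite | github.com/anthony-demandei/ia-compose-project | app/services/question_engine.py | _select_best_question_for_category
-- ===== SOURCE A (Python) =====
-- from typing import List, Dict, Any, Optional
--
-- def _select_best_question_for_category(project_description: str, category_questions: List[Dict]) -> Optional[Dict]:
--     """
--     Select the best question from a category based on project description.
--
--     Args:
--         project_description: Project description
--         category_questions: List of questions in the category
--
--     Returns:
--         Best matching question template or None
--     """
--     if not category_questions:
--         return None
--
--     description_lower = project_description.lower()
--
--     # Score questions based on keyword matches
--     scored_questions = []
--
--     for question in category_questions:
--         score = 0
--         keywords = question.get("keywords", [])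
--
--         for keyword in keywords:
--             if keyword in description_lower:
--                 score += 1
--
--         scored_questions.append((score, question))
--
--     # Sort by score and return the best one
--     scored_questions.sort(key=lambda x: x[0], reverse=True)
--
--     if scored_questions and scored_questions[0][0] > 0:
--         return scored_questions[0][1]
--
--     # If no good match, return the first question
--     return category_questions[0] if category_questions else None
-- ===== SOURCE B (Python) =====
-- def _select_best_question_for_category(project_description, category_questions):
--     if not category_questions:
--         return None
--
--     description_lower = project_description.lower()
--
--     best = None
--     best_score = 0
--     for question in category_questions:
--         score = sum(1 for kw in question.get("keywords", []) if kw in description_lower)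
--         if score > best_score:
--             best, best_score = question, score
--
--     return best if best is not None else category_questions[0]
-- ===== Notes on version B (the rewrite author's own statement) =====
-- stated objective: simpler
-- what changed: Replaces building a scored list and stable reverse-sorting it with a single pass that tracks the best question and score, updating only on strictly greater score (which preserves the stable sort's first-maximum tie-breaking).
import Mathlib
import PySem

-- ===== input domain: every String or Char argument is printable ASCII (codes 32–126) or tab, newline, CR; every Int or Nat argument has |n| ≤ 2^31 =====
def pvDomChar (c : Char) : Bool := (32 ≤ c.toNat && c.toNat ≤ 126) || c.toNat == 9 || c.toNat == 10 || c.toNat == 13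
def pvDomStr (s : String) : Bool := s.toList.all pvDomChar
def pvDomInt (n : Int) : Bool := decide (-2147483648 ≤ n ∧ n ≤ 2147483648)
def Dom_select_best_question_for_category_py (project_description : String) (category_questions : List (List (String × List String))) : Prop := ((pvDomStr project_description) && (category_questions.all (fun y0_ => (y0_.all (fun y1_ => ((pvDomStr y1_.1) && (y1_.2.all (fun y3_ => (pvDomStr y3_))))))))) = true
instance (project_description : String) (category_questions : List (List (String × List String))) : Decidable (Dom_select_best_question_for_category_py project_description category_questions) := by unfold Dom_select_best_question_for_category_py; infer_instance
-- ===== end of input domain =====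

-- B replaces the scored-list + stable reverse sort with a single strict-> scan; simpler, same results.


-- ===== PORT A =====
def select_best_question_for_category_py (project_description : String) (category_questions : List (List (String × List String))) : Option (List (String × List String)) :=
  if category_questions.isEmpty then none
  else
    let description_lower := PySem.Str.lower project_description
    let scored_questions : List (Int × List (String × List String)) :=
      category_questions.foldl (fun acc question =>
        let keywords := PySem.Dict.getD (PySem.Dict.mk question) "keywords" []
        let score : Int := keywords.foldl
          (fun s keyword => if PySem.Str.isIn keyword description_lower then s + 1 else s) 0
        acc ++ [(score, question)]) []
    match PySem.List.sorted scored_questions (fun x => x.1) true with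
    | (s, q) :: _ => if 0 < s then some q else category_questions.head?
    | [] => category_questions.head?

-- ===== PORT B =====
def select_best_question_for_category_py_alt (project_description : String) (category_questions : List (List (String × List String))) : Option (List (String × List String)) :=
  match category_questions with
  | [] => none
  | q0 :: _ =>
    let description_lower := PySem.Str.lower project_description
    let acc := category_questions.foldl
      (fun (acc : Option (List (String × List String)) × Int) question =>
        let score : Int :=
          ((PySem.Dict.getD (PySem.Dict.mk question) "keywords" []).countP
            (fun kw => PySem.Str.isIn kw description_lower) : Nat)
        if acc.2 < score then (some question, score) else acc)
      (none, 0)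
    some (acc.1.getD q0)

-- ===== PRECONDITION & SPEC =====
def Spec_select_best_question_for_category_py (project_description : String) (category_questions : List (List (String × List String))) (out : Option (List (String × List String))) : Prop := out = select_best_question_for_category_py_alt project_description category_questions
instance (project_description : String) (category_questions : List (List (String × List String))) (out : Option (List (String × List String))) : Decidable (Spec_select_best_question_for_category_py project_description category_questions out) := by unfold Spec_select_best_question_for_category_py; infer_instance

-- ===== CLAIM (what is proved, stated in full; the proofs are below) =====
def Claim_equal_select_best_question_for_category_py : Prop := ∀ (project_description : String) (category_questions : List (List (String × List String))), Dom_select_best_question_for_category_py project_description category_questions → Spec_select_best_question_for_category_py project_description category_questions (select_best_question_for_category_py project_description category_questions)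

-- ===== LEMMAS AND PROOFS =====

-- A's keyword-counting loop is countP (generalized over the accumulator).
theorem pv_foldl_count (p : String → Bool) (l : List String) (i : Int) :
    l.foldl (fun s kw => if p kw then s + 1 else s) i = i + (l.countP p : Nat) := by
  induction l generalizing i with
  | nil => simp
  | cons a t ih =>
    simp only [List.foldl_cons, List.countP_cons, ih]
    by_cases h : p a
    · simp [h]; omega
    · simp [h]

-- A's scored-list building loop is a map.
theorem pv_foldl_append_map {α β : Type} (f : α → β) (l : List α) (acc : List β) :
    l.foldl (fun acc q => acc ++ [f q]) acc = acc ++ l.map f := by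
  induction l generalizing acc with
  | nil => simp
  | cons a t ih => simp [ih]

-- insertBy into a nonempty list: the head is x if it goes before the old head, else the old head.
theorem pv_insertBy_cons {α : Type} (before : α → α → Bool) (x a : α) (l : List α) :
    PySem.List.insertBy before x (a :: l) =
      if before x a then x :: a :: l else a :: PySem.List.insertBy before x l := by
  simp [PySem.List.insertBy]

-- Head of the insertion-sort fold over a nonempty accumulator: a strict "first maximum" scan.
theorem pv_head_foldl_insertBy {α : Type} (before : α → α → Bool) (xs : List α)
    (a : α) (acc : List α) :
    (xs.foldl (fun acc x => PySem.List.insertBy before x acc) (a :: acc)).head? =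
      some (xs.foldl (fun h x => if before x h then x else h) a) := by
  induction xs generalizing a acc with
  | nil => simp
  | cons x t ih =>
    simp only [List.foldl_cons, pv_insertBy_cons]
    by_cases h : before x a <;> simp [h, ih]

-- The first-maximum scan preserves nonnegativity of the key.
theorem pv_fold_max_nonneg {α : Type} (l : List (Int × α)) (pr : Int × α) (h : 0 ≤ pr.1) :
    0 ≤ (l.foldl (fun h x => if h.1 < x.1 then x else h) pr).1 := by
  induction l generalizing pr with
  | nil => simpa using h
  | cons a t ih =>
    simp only [List.foldl_cons]
    by_cases hc : pr.1 < a.1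
    · exact ih _ (by simp [hc]; exact le_of_lt (lt_of_le_of_lt h hc))
    · exact ih _ (by simpa [hc] using h)

-- B's scan equals the pair form of the first-maximum scan, for nonnegative keys.
theorem pv_scan_inv {α : Type} (l : List (Int × α)) (m : Int × α)
    (hm : 0 ≤ m.1) (hl : ∀ p ∈ l, 0 ≤ p.1) :
    l.foldl (fun (acc : Option α × Int) p => if acc.2 < p.1 then (some p.2, p.1) else acc)
        ((if 0 < m.1 then some m.2 else none), m.1)
      = ((if 0 < (l.foldl (fun h x => if h.1 < x.1 then x else h) m).1
            then some (l.foldl (fun h x => if h.1 < x.1 then x else h) m).2 else none),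
         (l.foldl (fun h x => if h.1 < x.1 then x else h) m).1) := by
  induction l generalizing m with
  | nil => simp
  | cons p t ih =>
    simp only [List.foldl_cons]
    by_cases h : m.1 < p.1
    · have hp : 0 < p.1 := lt_of_le_of_lt hm h
      have := ih p (le_of_lt hp) (fun q hq => hl q (List.mem_cons_of_mem _ hq))
      simp only [h, if_pos, hp] at this ⊢
      simpa using this
    · have := ih m hm (fun q hq => hl q (List.mem_cons_of_mem _ hq))
      simp only [h, if_neg, not_false_iff] at this ⊢
      simpa using this

theorem select_best_question_for_category_py_eq_alt (project_description : String)
    (category_questions : List (List (String × List String))) :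
    select_best_question_for_category_py project_description category_questions =
      select_best_question_for_category_py_alt project_description category_questions := by
  unfold select_best_question_for_category_py select_best_question_for_category_py_alt
  cases category_questions with
  | nil => simp
  | cons q0 rest =>
    simp only [List.isEmpty_cons, Bool.false_eq_true, if_false, List.head?_cons]
    set dl := PySem.Str.lower project_description with hdl
    -- the common per-question score
    set f : List (String × List String) → Int := fun q =>
      ((PySem.Dict.getD (PySem.Dict.mk q) "keywords" []).countP
        (fun kw => PySem.Str.isIn kw dl) : Nat) with hf
    have hf0 : ∀ q, 0 ≤ f q := fun q => by simp [hf]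
    -- rewrite A's scored list as a map with key f
    have hscore : ∀ q : List (String × List String),
        (PySem.Dict.getD (PySem.Dict.mk q) "keywords" []).foldl
          (fun s kw => if PySem.Str.isIn kw dl then s + 1 else s) (0 : Int) = f q := by
      intro q; rw [pv_foldl_count]; simp [hf]
    have hlist :
        (q0 :: rest).foldl (fun acc question =>
          acc ++ [((PySem.Dict.getD (PySem.Dict.mk question) "keywords" []).foldl
            (fun s kw => if PySem.Str.isIn kw dl then s + 1 else s) (0 : Int), question)]) []
        = (q0 :: rest).map (fun q => (f q, q)) := by
      rw [show (fun (acc : List (Int × List (String × List String))) question =>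
          acc ++ [((PySem.Dict.getD (PySem.Dict.mk question) "keywords" []).foldl
            (fun s kw => if PySem.Str.isIn kw dl then s + 1 else s) (0 : Int), question)])
        = (fun acc question => acc ++ [(f question, question)]) from
          funext fun acc => funext fun q => by rw [hscore q]]
      exact pv_foldl_append_map _ _ []
    simp only [hlist]
    -- A's sorted head via the first-maximum scan
    have hA := PySem.List.sorted_rev_eq_foldl_insertBy
      ((q0 :: rest).map (fun q => (f q, q))) (fun x => x.1)
    have hhead :
        (PySem.List.sorted ((q0 :: rest).map (fun q => (f q, q))) (fun x => x.1) true).head?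
          = some ((rest.map (fun q => (f q, q))).foldl
              (fun h x => if h.1 < x.1 then x else h) (f q0, q0)) := by
      rw [hA]
      simp only [List.map_cons, List.foldl_cons]
      rw [show PySem.List.insertBy (fun a b => decide ((fun x => x.1) b < (fun x => x.1) a))
            (f q0, q0) [] = [(f q0, q0)] from by simp [PySem.List.insertBy]]
      rw [pv_head_foldl_insertBy]
      congr 1
      rw [show (fun (h x : Int × List (String × List String)) =>
          if (fun a b => decide ((fun x => x.1) b < (fun x => x.1) a)) x h then x else h)
        = (fun (h x : Int × List (String × List String)) => if h.1 < x.1 then x else h) from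
          funext fun h => funext fun x => by simp]
    -- name the first maximum
    set m := (rest.map (fun q => (f q, q))).foldl
      (fun h x => if h.1 < x.1 then x else h) (f q0, q0) with hmdef
    have hm0 : 0 ≤ m.1 := by
      exact pv_fold_max_nonneg _ _ (hf0 q0)
    -- B's fold: over the mapped pairs, first step then scan invariant
    have hB :
        (q0 :: rest).foldl
          (fun (acc : Option (List (String × List String)) × Int) question =>
            if acc.2 < f question then (some question, f question) else acc) (none, 0)
        = ((if 0 < m.1 then some m.2 else none), m.1) := by
      simp only [List.foldl_cons]
      have hfirst :
          (if (0 : Int) < f q0 then ((some q0 : Option (List (String × List String))), f q0)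
            else (none, 0))
          = ((if 0 < (f q0, q0).1 then some (f q0, q0).2 else none), (f q0, q0).1) := by
        by_cases h : (0 : Int) < f q0
        · simp [h]
        · have : f q0 = 0 := le_antisymm (not_lt.1 h) (hf0 q0)
          simp [this]
      rw [show (if ((none : Option (List (String × List String))), (0:Int)).2 < f q0
            then ((some q0 : Option (List (String × List String))), f q0)
            else ((none : Option (List (String × List String))), (0:Int)))
          = ((if 0 < (f q0, q0).1 then some (f q0, q0).2 else none), (f q0, q0).1) from hfirst]
      have := pv_scan_inv (rest.map (fun q => (f q, q))) (f q0, q0) (hf0 q0)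
        (by intro p hp; simp only [List.mem_map] at hp; obtain ⟨q, _, rfl⟩ := hp; exact hf0 q)
      rw [List.foldl_map] at this
      simpa [← hmdef] using this
    -- put the two sides together
    obtain ⟨s, q, t, hst⟩ :
        ∃ s q t, PySem.List.sorted ((q0 :: rest).map (fun q => (f q, q))) (fun x => x.1) true
          = (s, q) :: t := by
      rcases h : PySem.List.sorted ((q0 :: rest).map (fun q => (f q, q))) (fun x => x.1) true with
        _ | ⟨⟨s, q⟩, t⟩
      · exact absurd ((PySem.List.sorted_eq_nil_iff _ _ _).1 h) (by simp)
      · exact ⟨s, q, t, rfl⟩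
    rw [hst] at hhead ⊢
    simp only [List.head?_cons, Option.some.injEq] at hhead
    have hs : s = m.1 := congrArg Prod.fst hhead
    have hq : q = m.2 := congrArg Prod.snd hhead
    simp only [hf] at hB
    rw [hB, hs, hq]
    by_cases h : 0 < m.1 <;> simp [h]

-- ===== VERDICT (by name: the statement is the Claim_ definition above) =====
theorem select_best_question_for_category_py_spec : Claim_equal_select_best_question_for_category_py := by
  intro pd cqs _
  unfold Spec_select_best_question_for_category_py
  exact select_best_question_for_category_py_eq_alt pd cqs
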